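-- pv_equiv track=rewrite | github.com/lonniecoulter33-lgtm/Joi-Sovereign-OS | modules/joi_context_profiles.py | build_slim_system_prompt
-- ===== SOURCE A (Python) =====
-- from typing import Dict, List, Optional
--
-- def build_slim_system_prompt(profile: Dict, full_system_prompt: str) -> str:
--     """
--     Build a trimmed system prompt based on the profile settings.
--     If include_identity is False, strips personality/identity sections.
--     Respects max_context_chars limit.
--
--     Args:
--         profile: A profile dict from get_profile()
--         full_system_prompt: The complete system prompt to trim
--
--     Returns:
--         Trimmed system prompt string
--     """
--     if not full_system_prompt:
--         return ""
--
--     max_chars = profile.get("max_context_chars", 2000)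
--
--     if profile.get("include_identity") and profile.get("include_memory"):
--         # Full context — just truncate at max
--         return full_system_prompt[:max_chars * 4]  # 4x leeway for full context
--
--     # Strip identity/personality sections if not needed
--     lines = full_system_prompt.split("\n")
--     filtered: List[str] = []
--     skip_section = False
--
--     _identity_markers = [
--         "you are joi", "your name is", "personality", "character",
--         "identity", "soul", "emotion", "feeling", "empathy",
--     ]
--     _memory_markers = [
--         "remember that", "you recall", "user preference", "past interaction",
--         "conversation history",
--     ]
--
--     for line in lines:
--         line_lower = line.lower().strip()
--
--         # Section header detection
--         if line.startswith("#") or line.startswith("##"):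
--             skip_section = False
--             # Check if this section should be skipped
--             if not profile.get("include_identity"):
--                 if any(m in line_lower for m in _identity_markers):
--                     skip_section = True
--             if not profile.get("include_memory"):
--                 if any(m in line_lower for m in _memory_markers):
--                     skip_section = True
--
--         if not skip_section:
--             filtered.append(line)
--
--     result = "\n".join(filtered)
--     return result[:max_chars * 4]  # respect max but be generous
-- ===== SOURCE B (Python) =====
-- def build_slim_system_prompt(profile, full_system_prompt):
--     if not full_system_prompt:
--         return ""
--
--     max_chars = profile.get("max_context_chars", 2000)
--
--     if profile.get("include_identity") and profile.get("include_memory"):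
--         return full_system_prompt[:max_chars * 4]
--
--     bad_markers = []
--     if not profile.get("include_identity"):
--         bad_markers += [
--             "you are joi", "your name is", "personality", "character",
--             "identity", "soul", "emotion", "feeling", "empathy",
--         ]
--     if not profile.get("include_memory"):
--         bad_markers += [
--             "remember that", "you recall", "user preference", "past interaction",
--             "conversation history",
--         ]
--
--     lines = full_system_prompt.split("\n")
--     n = len(lines)
--
--     # preamble before the first '#' header is always kept
--     i = 0
--     while i < n and not lines[i].startswith("#"):
--         i += 1
--     out = lines[:i]
--
--     # each section: a '#' header line plus the non-header lines after it
--     while i < n: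
--         j = i + 1
--         while j < n and not lines[j].startswith("#"):
--             j += 1
--         header_lower = lines[i].lower().strip()
--         if not any(m in header_lower for m in bad_markers):
--             out.extend(lines[i:j])
--         i = j
--
--     return "\n".join(out)[:max_chars * 4]
-- ===== Notes on version B (the rewrite author's own statement) =====
-- stated objective: alternative
-- what changed: Replaced A's single fold carrying a skip_section flag (which lowercases/strips every line) by a section-based scan: keep the preamble before the first '#' header, group lines into header-delimited sections, decide keep/skip once per section from the header line against the concatenated disabled-marker list, and flatten the kept sections.
import Mathlib
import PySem

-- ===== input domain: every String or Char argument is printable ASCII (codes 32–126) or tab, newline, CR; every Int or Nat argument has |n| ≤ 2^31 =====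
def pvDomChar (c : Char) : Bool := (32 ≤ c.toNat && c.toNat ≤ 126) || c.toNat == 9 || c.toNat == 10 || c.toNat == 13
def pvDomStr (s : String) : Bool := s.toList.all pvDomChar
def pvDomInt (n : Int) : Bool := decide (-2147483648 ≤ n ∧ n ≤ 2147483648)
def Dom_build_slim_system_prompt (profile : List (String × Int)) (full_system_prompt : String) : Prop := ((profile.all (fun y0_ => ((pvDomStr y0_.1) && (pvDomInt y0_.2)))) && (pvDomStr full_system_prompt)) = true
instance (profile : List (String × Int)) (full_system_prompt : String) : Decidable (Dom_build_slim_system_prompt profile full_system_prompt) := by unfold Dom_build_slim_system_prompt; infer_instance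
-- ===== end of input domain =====

-- B replaces A's one-pass skip-flag fold by a section-grouping scan (keep/skip decided once per header); same return value, no speed claim.

-- shared dict primitives (profile.get)
def pvGet? (profile : List (String × Int)) (k : String) : Option Int :=
  (PySem.Dict.ofList profile).get? k

def pvTruthy (profile : List (String × Int)) (k : String) : Bool :=
  match pvGet? profile k with
  | some v => v != 0
  | none => false

def pvMaxChars (profile : List (String × Int)) : Int :=
  (pvGet? profile "max_context_chars").getD 2000

def pvIdMarkers : List String :=
  ["you are joi", "your name is", "personality", "character",
   "identity", "soul", "emotion", "feeling", "empathy"]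

def pvMemMarkers : List String :=
  ["remember that", "you recall", "user preference", "past interaction",
   "conversation history"]

-- ===== PORT A =====
def pvStepA (profile : List (String × Int)) (st : List String × Bool) (line : String) : List String × Bool :=
  let line_lower := PySem.Str.strip (PySem.Str.lower line)
  let skip :=
    if PySem.Str.startswith line "#" || PySem.Str.startswith line "##" then
      let sk0 := false
      let sk1 := if !pvTruthy profile "include_identity" then
                   (if pvIdMarkers.any (fun m => PySem.Str.isIn m line_lower) then true else sk0)
                 else sk0
      let sk2 := if !pvTruthy profile "include_memory" then
                   (if pvMemMarkers.any (fun m => PySem.Str.isIn m line_lower) then true else sk1)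
                 else sk1
      sk2
    else st.2
  (if !skip then st.1 ++ [line] else st.1, skip)

def build_slim_system_prompt (profile : List (String × Int)) (full_system_prompt : String) : String :=
  if full_system_prompt = "" then "" else
  let max_chars := pvMaxChars profile
  if pvTruthy profile "include_identity" && pvTruthy profile "include_memory" then
    PySem.Str.slice full_system_prompt none (some (max_chars * 4))
  else
    let lines := (PySem.Str.split? full_system_prompt "\n").getD []
    let st := lines.foldl (pvStepA profile) ([], false)
    let result := PySem.Str.join "\n" st.1
    PySem.Str.slice result none (some (max_chars * 4))

-- ===== PORT B =====
-- the inner 'while j < n and not lines[j].startswith("#")' scan: (section body, remaining lines)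
def pvSpanBody : List String → List String × List String
  | [] => ([], [])
  | l :: rest =>
    if PySem.Str.startswith l "#" then ([], l :: rest)
    else
      let p := pvSpanBody rest
      (l :: p.1, p.2)

theorem pvSpanBody_snd_length_le (ls : List String) : (pvSpanBody ls).2.length ≤ ls.length := by
  induction ls with
  | nil => simp [pvSpanBody]
  | cons l rest ih =>
    simp only [pvSpanBody]
    split
    · simp
    · simpa using Nat.le_succ_of_le ih

def pvBadMarkers (profile : List (String × Int)) : List String :=
  (if !pvTruthy profile "include_identity" then pvIdMarkers else []) ++
  (if !pvTruthy profile "include_memory" then pvMemMarkers else [])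

def pvKeep (profile : List (String × Int)) (header : String) : Bool :=
  !((pvBadMarkers profile).any
      (fun m => PySem.Str.isIn m (PySem.Str.strip (PySem.Str.lower header))))

-- the outer 'while i < n' loop over header-delimited sections
def pvSections (profile : List (String × Int)) : List String → List String
  | [] => []
  | l :: rest =>
    let p := pvSpanBody rest
    if pvKeep profile l then (l :: p.1) ++ pvSections profile p.2
    else pvSections profile p.2
termination_by ls => ls.length
decreasing_by
  all_goals
    have h := pvSpanBody_snd_length_le rest
    simp only [List.length_cons]
    omega

def build_slim_system_prompt_alt (profile : List (String × Int)) (full_system_prompt : String) : String :=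
  if full_system_prompt = "" then "" else
  let max_chars := pvMaxChars profile
  if pvTruthy profile "include_identity" && pvTruthy profile "include_memory" then
    PySem.Str.slice full_system_prompt none (some (max_chars * 4))
  else
    let lines := (PySem.Str.split? full_system_prompt "\n").getD []
    let p := pvSpanBody lines
    PySem.Str.slice (PySem.Str.join "\n" (p.1 ++ pvSections profile p.2)) none (some (max_chars * 4))

-- ===== PRECONDITION & SPEC =====
def Spec_build_slim_system_prompt (profile : List (String × Int)) (full_system_prompt : String) (out : String) : Prop := out = build_slim_system_prompt_alt profile full_system_prompt
instance (profile : List (String × Int)) (full_system_prompt : String) (out : String) : Decidable (Spec_build_slim_system_prompt profile full_system_prompt out) := by unfold Spec_build_slim_system_prompt; infer_instance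

-- ===== CLAIM (what is proved, stated in full; the proofs are below) =====
def Claim_equal_build_slim_system_prompt : Prop := ∀ (profile : List (String × Int)) (full_system_prompt : String), Dom_build_slim_system_prompt profile full_system_prompt → Spec_build_slim_system_prompt profile full_system_prompt (build_slim_system_prompt profile full_system_prompt)

-- ===== LEMMAS AND PROOFS =====

theorem pv_not_hash_not_hashhash {l : String} (h : PySem.Str.startswith l "#" = false) :
    PySem.Str.startswith l "##" = false := by
  rw [PySem.Str.startswith_eq] at h ⊢
  by_contra hc
  have hc' : PySem.Chars.startswith l.toList "##".toList = true := by
    cases hq : PySem.Chars.startswith l.toList "##".toList <;> simp_all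
  have hp := (PySem.Chars.startswith_iff _ _).mp hc'
  have hp1 : ("#".toList) <+: l.toList := List.IsPrefix.trans (by decide) hp
  have := (PySem.Chars.startswith_iff l.toList "#".toList).mpr hp1
  rw [h] at this
  exact Bool.false_ne_true this

theorem pvStepA_nonheader (profile : List (String × Int)) (st : List String × Bool) (line : String)
    (h : PySem.Str.startswith line "#" = false) :
    pvStepA profile st line = (if !st.2 then st.1 ++ [line] else st.1, st.2) := by
  have h2 := pv_not_hash_not_hashhash h
  simp only [pvStepA, h, h2, Bool.or_self, Bool.false_eq_true, if_false]

set_option maxHeartbeats 1000000 in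
theorem pvStepA_header (profile : List (String × Int)) (st : List String × Bool) (line : String)
    (h : PySem.Str.startswith line "#" = true) :
    pvStepA profile st line =
      (if pvKeep profile line then st.1 ++ [line] else st.1, !pvKeep profile line) := by
  simp only [pvStepA, pvKeep, pvBadMarkers, h, Bool.true_or, if_true]
  by_cases hI : pvTruthy profile "include_identity" = true <;>
    by_cases hM : pvTruthy profile "include_memory" = true <;>
      by_cases hA : (pvIdMarkers.any fun m => PySem.Str.isIn m (PySem.Str.strip (PySem.Str.lower line))) = true <;>
        by_cases hB : (pvMemMarkers.any fun m => PySem.Str.isIn m (PySem.Str.strip (PySem.Str.lower line))) = true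
  all_goals simp_all [List.any_append]
  all_goals rw [Bool.eq_iff_iff]
  all_goals simp only [List.any_eq_true, decide_eq_true_eq, Bool.or_eq_true]
  all_goals first
    | exact Iff.rfl
    | exact Or.comm

theorem pvSpanBody_spec (ls : List String) :
    ls = (pvSpanBody ls).1 ++ (pvSpanBody ls).2 ∧
    (∀ l ∈ (pvSpanBody ls).1, PySem.Str.startswith l "#" = false) ∧
    (∀ l r, (pvSpanBody ls).2 = l :: r → PySem.Str.startswith l "#" = true) := by
  induction ls with
  | nil => simp [pvSpanBody]
  | cons l rest ih =>
    simp only [pvSpanBody]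
    split
    · rename_i h
      refine ⟨by simp, by simp, ?_⟩
      intro l' r' he
      simp at he
      rw [← he.1]; exact h
    · rename_i h
      refine ⟨by simpa using ih.1, ?_, ih.2.2⟩
      intro l' hl'
      simp at hl'
      rcases hl' with hl' | hl'
      · subst hl'; simpa using h
      · exact ih.2.1 l' hl'

theorem pvSpanBody_of_header (ls : List String)
    (h : ls = [] ∨ ∃ l r, ls = l :: r ∧ PySem.Str.startswith l "#" = true) :
    pvSpanBody ls = ([], ls) := by
  rcases h with h | ⟨l, r, rfl, hl⟩
  · simp [h, pvSpanBody]
  · simp only [pvSpanBody, hl]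
    simp

-- skip body lines while skip_section is true: nothing is appended
theorem pv_fold_body_true (profile : List (String × Int)) (body tail : List String) (acc : List String)
    (hb : ∀ l ∈ body, PySem.Str.startswith l "#" = false) :
    (body ++ tail).foldl (pvStepA profile) (acc, true) = tail.foldl (pvStepA profile) (acc, true) := by
  induction body generalizing acc with
  | nil => simp
  | cons l body ih =>
    have hl := hb l (by simp)
    simp only [List.cons_append, List.foldl_cons, pvStepA_nonheader profile _ _ hl]
    simpa using ih acc (fun x hx => hb x (by simp [hx]))

-- keep body lines while skip_section is false: they all get appended
theorem pv_fold_body_false (profile : List (String × Int)) (body tail : List String) (acc : List String)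
    (hb : ∀ l ∈ body, PySem.Str.startswith l "#" = false) :
    (body ++ tail).foldl (pvStepA profile) (acc, false) = tail.foldl (pvStepA profile) (acc ++ body, false) := by
  induction body generalizing acc with
  | nil => simp
  | cons l body ih =>
    have hl := hb l (by simp)
    simp only [List.cons_append, List.foldl_cons, pvStepA_nonheader profile _ _ hl]
    simpa using ih (acc ++ [l]) (fun x hx => hb x (by simp [hx]))

-- incoming skip flag is irrelevant when the next line is a header (or the list ends): first components agree
theorem pv_fold_header_skip_irrelevant (profile : List (String × Int)) (ls : List String) (acc : List String)
    (h : ls = [] ∨ ∃ l r, ls = l :: r ∧ PySem.Str.startswith l "#" = true) :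
    (ls.foldl (pvStepA profile) (acc, true)).1 = (ls.foldl (pvStepA profile) (acc, false)).1 := by
  rcases h with rfl | ⟨l, r, rfl, hl⟩
  · simp
  · simp only [List.foldl_cons, pvStepA_header profile _ _ hl]

-- MAIN INVARIANT: A's fold from skip=false computes B's preamble ++ sections
theorem pvSections_nil (profile : List (String × Int)) : pvSections profile [] = [] := by
  simp [pvSections]

theorem pvSections_cons (profile : List (String × Int)) (l : String) (rest : List String) :
    pvSections profile (l :: rest) =
      if pvKeep profile l then (l :: (pvSpanBody rest).1) ++ pvSections profile (pvSpanBody rest).2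
      else pvSections profile (pvSpanBody rest).2 := by
  rw [pvSections]

theorem pv_main (profile : List (String × Int)) (ls : List String) (acc : List String) :
    (ls.foldl (pvStepA profile) (acc, false)).1 =
      acc ++ (pvSpanBody ls).1 ++ pvSections profile (pvSpanBody ls).2 := by
  generalize hn : ls.length = n
  induction n using Nat.strong_induction_on generalizing ls acc with
  | _ n ih =>
  obtain ⟨hsplit, hpre, hhead⟩ := pvSpanBody_spec ls
  have hfold : ls.foldl (pvStepA profile) (acc, false) =
      ((pvSpanBody ls).1 ++ (pvSpanBody ls).2).foldl (pvStepA profile) (acc, false) := by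
    rw [← hsplit]
  rw [hfold, pv_fold_body_false profile _ _ _ hpre]
  rcases hrest : (pvSpanBody ls).2 with _ | ⟨l, rest2⟩
  · simp [pvSections_nil]
  · have hl : PySem.Str.startswith l "#" = true := hhead l rest2 hrest
    obtain ⟨hsplit2, hpre2, hhead2⟩ := pvSpanBody_spec rest2
    have hcond : (pvSpanBody rest2).2 = [] ∨
        ∃ l' r', (pvSpanBody rest2).2 = l' :: r' ∧ PySem.Str.startswith l' "#" = true := by
      rcases h2 : (pvSpanBody rest2).2 with _ | ⟨l', r'⟩
      · exact Or.inl rfl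
      · exact Or.inr ⟨l', r', rfl, hhead2 l' r' h2⟩
    have hrest3 : pvSpanBody (pvSpanBody rest2).2 = ([], (pvSpanBody rest2).2) :=
      pvSpanBody_of_header _ hcond
    have hlen : (pvSpanBody rest2).2.length < n := by
      have h1 := pvSpanBody_snd_length_le rest2
      have h2 : ls.length = (pvSpanBody ls).1.length + (pvSpanBody ls).2.length := by
        conv_lhs => rw [hsplit]
        simp
      rw [hrest] at h2
      simp at h2
      omega
    have hfold2 : ∀ init : List String × Bool, rest2.foldl (pvStepA profile) init =
        ((pvSpanBody rest2).1 ++ (pvSpanBody rest2).2).foldl (pvStepA profile) init := by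
      intro init
      conv_lhs => rw [hsplit2]
    simp only [List.foldl_cons, pvStepA_header profile _ _ hl, pvSections_cons]
    by_cases hk : pvKeep profile l = true
    · simp only [hk, if_true, Bool.not_true]
      rw [hfold2, pv_fold_body_false profile _ _ _ hpre2]
      rw [ih _ hlen _ _ rfl, hrest3]
      simp only [List.append_assoc, List.nil_append, List.cons_append, List.append_nil]
    · have hk' : pvKeep profile l = false := Bool.eq_false_iff.mpr hk
      simp only [hk', Bool.not_false]
      rw [hfold2, pv_fold_body_true profile _ _ _ hpre2]
      rw [pv_fold_header_skip_irrelevant profile _ _ hcond, ih _ hlen _ _ rfl, hrest3]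
      simp only [Bool.false_eq_true, if_false, List.append_assoc, List.append_nil]

-- ===== VERDICT (by name: the statement is the Claim_ definition above) =====
theorem build_slim_system_prompt_spec : Claim_equal_build_slim_system_prompt := by
  intro profile s _
  unfold Spec_build_slim_system_prompt
  simp only [build_slim_system_prompt, build_slim_system_prompt_alt]
  split_ifs with h1 h2
  · rfl
  · rfl
  · rw [pv_main profile _ []]
    simp
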